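-- pv_equiv track=rewrite | github.com/Suncrowns/123123123 | main.py | define_count_of_unique_words_and_user_word_count
-- ===== SOURCE A (Python) =====
-- def define_count_of_unique_words_and_user_word_count(lst, user_word):
--     lst_of_words = []
--     user_word = user_word.lower()
--     set_of_words = set()
--     for sentences in lst:
--         words = sentences.split()
--         for word in words:
--             lst_of_words.append(word.strip().lower())
--             set_of_words.add(word.strip().lower())
--     uniquie_words = set()
--     for word in set_of_words:
--         if lst_of_words.count(word) == 1:
--             uniquie_words.add(word)
--     return len(uniquie_words), lst_of_words.count(user_word)
-- ===== SOURCE B (Python) =====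
-- def define_count_of_unique_words_and_user_word_count(lst, user_word):
--     # sort-and-group instead of per-word .count() scans
--     words = [w.strip().lower() for s in lst for w in s.split()]
--     uw = user_word.lower()
--     unique = 0
--     cur = None
--     run = 0
--     for w in sorted(words):
--         if w == cur:
--             run += 1
--         else:
--             if run == 1:
--                 unique += 1
--             cur = w
--             run = 1
--     if run == 1:
--         unique += 1
--     return unique, sum(1 for x in words if x == uw)
-- ===== Notes on version B (the rewrite author's own statement) =====
-- stated objective: faster
-- what changed: Replaces A's per-distinct-word list.count scans over the whole word list (and the auxiliary Python set) by sorting the flattened word list once and counting length-1 runs in a single pass; the user_word tally becomes a single filter over the word list.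
import Mathlib
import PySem

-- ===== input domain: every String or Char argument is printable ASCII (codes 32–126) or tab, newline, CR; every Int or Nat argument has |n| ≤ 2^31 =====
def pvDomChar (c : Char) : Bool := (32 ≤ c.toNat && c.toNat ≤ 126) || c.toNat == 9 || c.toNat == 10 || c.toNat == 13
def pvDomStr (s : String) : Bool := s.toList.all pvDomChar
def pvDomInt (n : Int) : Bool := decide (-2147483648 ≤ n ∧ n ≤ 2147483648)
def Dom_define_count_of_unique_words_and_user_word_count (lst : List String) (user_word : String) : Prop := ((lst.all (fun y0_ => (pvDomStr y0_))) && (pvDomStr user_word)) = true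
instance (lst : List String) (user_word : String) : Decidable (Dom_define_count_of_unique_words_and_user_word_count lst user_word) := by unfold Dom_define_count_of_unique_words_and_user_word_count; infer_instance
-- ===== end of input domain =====

-- B replaces A's per-distinct-word `.count` scans by sort-then-group run counting in one pass (objective: faster).

-- ===== PORT A =====
def define_count_of_unique_words_and_user_word_count (lst : List String) (user_word : String) : Int × Int :=
  let uw := PySem.Str.lower user_word
  let p : List String × PySem.Set String :=
    lst.foldl (fun acc sentences =>
      (PySem.Str.split₀ sentences).foldl (fun acc2 word =>
        (acc2.1 ++ [PySem.Str.lower (PySem.Str.strip word)],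
         PySem.Set.add acc2.2 (PySem.Str.lower (PySem.Str.strip word)))) acc)
      ([], PySem.Set.empty)
  let uniq : PySem.Set String :=
    p.2.foldl (fun us word =>
      if PySem.List.count p.1 word == 1 then PySem.Set.add us word else us) PySem.Set.empty
  (PySem.Set.len uniq, (PySem.List.count p.1 uw : Int))

-- ===== PORT B =====
def define_count_of_unique_words_and_user_word_count_alt (lst : List String) (user_word : String) : Int × Int :=
  let words : List String :=
    lst.flatMap (fun s => (PySem.Str.split₀ s).map (fun w => PySem.Str.lower (PySem.Str.strip w)))
  let uw := PySem.Str.lower user_word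
  let r : Int × Option String × Nat :=
    (PySem.List.sorted words (fun x => x) false).foldl
      (fun st w =>
        if some w == st.2.1 then (st.1, st.2.1, st.2.2 + 1)
        else ((if st.2.2 == 1 then st.1 + 1 else st.1), some w, 1))
      (0, none, 0)
  let unique : Int := if r.2.2 == 1 then r.1 + 1 else r.1
  (unique, ((words.filter (fun x => x == uw)).length : Int))

-- ===== PRECONDITION & SPEC =====
def Spec_define_count_of_unique_words_and_user_word_count (lst : List String) (user_word : String) (out : Int × Int) : Prop := out = define_count_of_unique_words_and_user_word_count_alt lst user_word
instance (lst : List String) (user_word : String) (out : Int × Int) : Decidable (Spec_define_count_of_unique_words_and_user_word_count lst user_word out) := by unfold Spec_define_count_of_unique_words_and_user_word_count; infer_instance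

-- ===== CLAIM (what is proved, stated in full; the proofs are below) =====
def Claim_equal_define_count_of_unique_words_and_user_word_count : Prop := ∀ (lst : List String) (user_word : String), Dom_define_count_of_unique_words_and_user_word_count lst user_word → Spec_define_count_of_unique_words_and_user_word_count lst user_word (define_count_of_unique_words_and_user_word_count lst user_word)

-- ===== LEMMAS AND PROOFS =====

-- the word normaliser and the flattened word list (B's `words`)
def pvNorm (w : String) : String := PySem.Str.lower (PySem.Str.strip w)

def pvWords (lst : List String) : List String :=
  lst.flatMap (fun s => (PySem.Str.split₀ s).map pvNorm)

-- number of distinct words occurring exactly once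
def pvU (t : List String) : Nat :=
  (t.toFinset.filter (fun w => t.count w = 1)).card

-- recursive form of B's scan (fold + final flush)
def pvScan : List String → Int → Option String → Nat → Int
  | [], u, _, run => if run == 1 then u + 1 else u
  | w :: rest, u, cur, run =>
    if some w == cur then pvScan rest u cur (run + 1)
    else pvScan rest (if run == 1 then u + 1 else u) (some w) 1

-- B's foldl-with-flush equals pvScan
lemma pvScan_eq_fold (l : List String) (u : Int) (cur : Option String) (run : Nat) :
    (let r := l.foldl
      (fun (st : Int × Option String × Nat) w =>
        if some w == st.2.1 then (st.1, st.2.1, st.2.2 + 1)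
        else ((if st.2.2 == 1 then st.1 + 1 else st.1), some w, 1))
      (u, cur, run)
     ; if r.2.2 == 1 then r.1 + 1 else r.1) = pvScan l u cur run := by
  induction l generalizing u cur run with
  | nil => rfl
  | cons w rest ih =>
    by_cases h : some w = cur
    · simpa [List.foldl_cons, h, pvScan] using ih u cur (run + 1)
    · simpa [List.foldl_cons, h, pvScan] using ih (if run == 1 then u + 1 else u) (some w) 1

-- A's inner word loop
lemma pvFoldInner (ws : List String) (acc : List String × PySem.Set String) :
    ws.foldl (fun acc2 word =>
        (acc2.1 ++ [PySem.Str.lower (PySem.Str.strip word)],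
         PySem.Set.add acc2.2 (PySem.Str.lower (PySem.Str.strip word)))) acc
      = (acc.1 ++ ws.map pvNorm, PySem.Set.update acc.2 (ws.map pvNorm)) := by
  induction ws generalizing acc with
  | nil => simp [PySem.Set.update]
  | cons w t ih =>
    rw [List.foldl_cons, ih]
    simp [pvNorm, PySem.Set.update, List.append_assoc]

-- A's outer sentence loop
lemma pvFoldA (lst : List String) (acc : List String × PySem.Set String) :
    lst.foldl (fun acc sentences =>
      (PySem.Str.split₀ sentences).foldl (fun acc2 word =>
        (acc2.1 ++ [PySem.Str.lower (PySem.Str.strip word)],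
         PySem.Set.add acc2.2 (PySem.Str.lower (PySem.Str.strip word)))) acc) acc
    = (acc.1 ++ pvWords lst, PySem.Set.update acc.2 (pvWords lst)) := by
  induction lst generalizing acc with
  | nil => simp [pvWords, PySem.Set.update]
  | cons s t ih =>
    rw [List.foldl_cons, pvFoldInner, ih]
    simp [pvWords, PySem.Set.update, List.foldl_append, List.append_assoc]

-- folding `add` over nodup fresh elements with a filter = filter
lemma pvFoldFilter (q : String → Bool) (d : List String) (us0 : List String)
    (hd : d.Nodup) (hfresh : ∀ w ∈ d, w ∉ us0) :
    d.foldl (fun us w => if q w then PySem.Set.add us w else us) us0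
      = us0 ++ d.filter q := by
  induction d generalizing us0 with
  | nil => simp
  | cons w t ih =>
    have hwt : w ∉ t := (List.nodup_cons.mp hd).1
    have hw0 : w ∉ us0 := hfresh w (List.mem_cons_self ..)
    rw [List.foldl_cons]
    by_cases hq : q w = true
    · have hadd : PySem.Set.add us0 w = us0 ++ [w] := by
        simp [PySem.Set.add, hw0]
      rw [hq |> if_pos, hadd, ih (us0 ++ [w]) (List.nodup_cons.mp hd).2
        (fun x hx => by
          simp only [List.mem_append, List.mem_singleton, not_or]
          exact ⟨hfresh x (List.mem_cons_of_mem _ hx), fun he => hwt (he ▸ hx)⟩)]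
      simp [hq, List.append_assoc]
    · rw [if_neg (by simpa using hq)]
      rw [ih us0 (List.nodup_cons.mp hd).2 (fun x hx => hfresh x (List.mem_cons_of_mem _ hx))]
      simp [hq]

-- length of a filtered nodup list as a Finset card
lemma pvFilterCard (d : List String) (hd : d.Nodup) (p : String → Prop) [DecidablePred p] :
    (d.filter (fun w => decide (p w))).length = (d.toFinset.filter p).card := by
  rw [← List.toFinset_card_of_nodup (hd.filter _), List.toFinset_filter]
  congr 1
  exact Finset.filter_congr (fun x _ => by simp)

-- filter over an erased set only looks at elements ≠ a
lemma pvFilterEraseCongr (a : String) (s : Finset String) (p q : String → Prop)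
    [DecidablePred p] [DecidablePred q] (h : ∀ x, x ≠ a → (p x ↔ q x)) :
    (s.erase a).filter p = (s.erase a).filter q :=
  Finset.filter_congr (fun x hx => h x (Finset.ne_of_mem_erase hx))

-- head-count facts
lemma pvCountHead (w : String) (rest : List String) :
    (w :: rest).count w = 1 + rest.count w := by
  simp; omega

lemma pvCountTail (w x : String) (rest : List String) (hx : x ≠ w) :
    (w :: rest).count x = rest.count x := by
  simp [Ne.symm hx]

-- peeling the head off the distinct-singleton count
lemma pvDecomp (w : String) (rest : List String) :
    ((w :: rest).toFinset.filter (fun x => (w :: rest).count x = 1)).card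
      = (if 1 + rest.count w = 1 then 1 else 0)
        + ((rest.toFinset.erase w).filter (fun x => rest.count x = 1)).card := by
  rw [List.toFinset_cons, Finset.filter_insert]
  by_cases h0 : rest.count w = 0
  · have hwr : w ∉ rest := List.count_eq_zero.mp h0
    have hws : w ∉ rest.toFinset := by simpa using hwr
    rw [if_pos (by rw [pvCountHead, h0])]
    rw [Finset.erase_eq_of_notMem hws]
    rw [Finset.card_insert_of_notMem (by
      intro hm; exact hws (Finset.mem_of_mem_filter _ hm))]
    rw [Finset.filter_congr (p := fun x => (w :: rest).count x = 1)
      (q := fun x => rest.count x = 1)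
      (fun x hx => by
        simp only []
        rw [pvCountTail w x rest (by rintro rfl; exact hws hx)])]
    simp [h0]; omega
  · rw [if_neg (by rw [pvCountHead]; omega)]
    have hwnot : w ∉ rest.toFinset.filter (fun x => (w :: rest).count x = 1) := by
      intro hm
      have := (Finset.mem_filter.mp hm).2
      rw [pvCountHead] at this; omega
    rw [pvFilterEraseCongr w rest.toFinset
      (fun x => rest.count x = 1) (fun x => (w :: rest).count x = 1)
      (fun x hx => by
        show rest.count x = 1 ↔ (w :: rest).count x = 1
        rw [pvCountTail w x rest hx])]
    rw [Finset.filter_erase, Finset.erase_eq_of_notMem hwnot]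
    simp [h0]

-- the main scan lemma: on a sorted list the scan counts singleton runs
lemma pvScan_aux (t : List String) (ht : t.Pairwise (· ≤ ·)) (h : String)
    (hle : ∀ x ∈ t, h ≤ x) (r : Nat) (hr : 1 ≤ r) (u : Int) :
    pvScan t u (some h) r
      = u + (if r + t.count h = 1 then 1 else 0)
          + (((t.toFinset.erase h).filter (fun w => t.count w = 1)).card : Int) := by
  induction t generalizing h r u with
  | nil =>
    simp only [pvScan, List.count_nil, List.toFinset_nil, Finset.erase_empty,
      Finset.filter_empty, Finset.card_empty, Nat.cast_zero, add_zero,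
      beq_iff_eq]
    split_ifs <;> omega
  | cons w rest ih =>
    have hw_le : ∀ x ∈ rest, w ≤ x := (List.pairwise_cons.mp ht).1
    have ht' : rest.Pairwise (· ≤ ·) := (List.pairwise_cons.mp ht).2
    by_cases hwh : w = h
    · subst hwh
      rw [pvScan, if_pos (by simp)]
      rw [ih ht' w (fun x hx => hw_le x hx) (r + 1) (by omega) u]
      have hset : ((w :: rest).toFinset.erase w).filter (fun x => (w :: rest).count x = 1)
          = (rest.toFinset.erase w).filter (fun x => rest.count x = 1) := by
        rw [List.toFinset_cons, Finset.erase_insert_eq_erase]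
        exact pvFilterEraseCongr w rest.toFinset _ _
          (fun x hx => by rw [pvCountTail w x rest hx])
      rw [hset, if_neg (by omega), if_neg (by rw [pvCountHead]; omega)]
    · have hhw : h < w := lt_of_le_of_ne (hle w (List.mem_cons_self ..)) (Ne.symm hwh)
      have hhrest : h ∉ rest := fun hm => absurd (lt_of_lt_of_le hhw (hw_le h hm)) (lt_irrefl h)
      have hhall : h ∉ (w :: rest) := by
        intro hm; rcases List.mem_cons.mp hm with h1 | h1
        · exact hwh h1.symm
        · exact hhrest h1
      rw [pvScan, if_neg (by simp [hwh])]
      rw [ih ht' w hw_le 1 (le_refl 1) (if r == 1 then u + 1 else u)]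
      have hch : (w :: rest).count h = 0 := List.count_eq_zero.mpr hhall
      have herase : ((w :: rest).toFinset.erase h) = (w :: rest).toFinset :=
        Finset.erase_eq_of_notMem (by simpa using hhall)
      rw [hch, herase, pvDecomp w rest]
      push_cast
      by_cases hr1 : r = 1 <;> simp [hr1] <;> split_ifs <;> ring

lemma pvScan_main (t : List String) (ht : t.Pairwise (· ≤ ·)) (u : Int) :
    pvScan t u none 0 = u + (pvU t : Int) := by
  cases t with
  | nil => simp [pvScan, pvU]
  | cons w rest =>
    have hw_le : ∀ x ∈ rest, w ≤ x := (List.pairwise_cons.mp ht).1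
    have ht' : rest.Pairwise (· ≤ ·) := (List.pairwise_cons.mp ht).2
    rw [pvScan, if_neg (by simp)]
    rw [pvScan_aux rest ht' w hw_le 1 (le_refl 1) (if (0 : Nat) == 1 then u + 1 else u)]
    unfold pvU
    rw [pvDecomp w rest]
    push_cast
    split_ifs <;> ring

-- pvU is invariant under permutation
lemma pvU_perm {t s : List String} (hp : t.Perm s) : pvU t = pvU s := by
  unfold pvU
  rw [List.toFinset_eq_of_perm _ _ hp]
  exact congrArg Finset.card (Finset.filter_congr (fun x _ => by rw [hp.count_eq]))

-- ===== VERDICT (by name: the statement is the Claim_ definition above) =====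
theorem define_count_of_unique_words_and_user_word_count_spec : Claim_equal_define_count_of_unique_words_and_user_word_count := by
  intro lst user_word _
  show define_count_of_unique_words_and_user_word_count lst user_word
      = define_count_of_unique_words_and_user_word_count_alt lst user_word
  have hnodup := PySem.Set.nodup_ofList (pvWords lst)
  have hA : define_count_of_unique_words_and_user_word_count lst user_word
      = ((pvU (pvWords lst) : Int),
         (PySem.List.count (pvWords lst) (PySem.Str.lower user_word) : Int)) := by
    unfold define_count_of_unique_words_and_user_word_count
    rw [pvFoldA lst ([], PySem.Set.empty)]
    show (PySem.Set.len
        (List.foldl (fun us word =>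
          if PySem.List.count (pvWords lst) word == 1 then PySem.Set.add us word else us)
          PySem.Set.empty (PySem.Set.ofList (pvWords lst))),
        ((PySem.List.count (pvWords lst) (PySem.Str.lower user_word) : Int))) = _
    have hfold := pvFoldFilter (fun word => PySem.List.count (pvWords lst) word == 1)
      (PySem.Set.ofList (pvWords lst)) PySem.Set.empty hnodup (by intro w _; simp [PySem.Set.empty])
    beta_reduce at hfold
    rw [hfold]
    have hq : (fun word => (PySem.List.count (pvWords lst) word == 1))
        = (fun word => decide (List.count word (pvWords lst) = 1)) := by
      funext word; simp only [PySem.List.count]; exact Bool.beq_eq_decide_eq _ 1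
    have hA1 : PySem.Set.len ((PySem.Set.empty : PySem.Set String)
        ++ (PySem.Set.ofList (pvWords lst)).filter
            (fun word => PySem.List.count (pvWords lst) word == 1))
        = (pvU (pvWords lst) : Int) := by
      simp only [PySem.Set.len, PySem.Set.empty, List.nil_append, hq]
      rw [pvFilterCard (PySem.Set.ofList (pvWords lst)) hnodup
        (fun w => List.count w (pvWords lst) = 1)]
      have hfs : (PySem.Set.ofList (pvWords lst)).toFinset = (pvWords lst).toFinset := by
        ext x; simp [PySem.Set.mem_ofList]
      rw [pvU, hfs]
    rw [hA1]
  have hB : define_count_of_unique_words_and_user_word_count_alt lst user_word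
      = ((pvU (pvWords lst) : Int),
         (PySem.List.count (pvWords lst) (PySem.Str.lower user_word) : Int)) := by
    unfold define_count_of_unique_words_and_user_word_count_alt
    show ((let r := ((PySem.List.sorted (pvWords lst) (fun x => x) false).foldl
              (fun (st : Int × Option String × Nat) w =>
                if some w == st.2.1 then (st.1, st.2.1, st.2.2 + 1)
                else ((if st.2.2 == 1 then st.1 + 1 else st.1), some w, 1))
              (0, none, 0));
          if r.2.2 == 1 then r.1 + 1 else r.1),
      (((pvWords lst).filter (fun x => x == PySem.Str.lower user_word)).length : Int)) = _
    have hsorted : (PySem.List.sorted (pvWords lst) (fun x => x) false).Pairwise (· ≤ ·) := by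
      simpa using PySem.List.sorted_pairwise (pvWords lst) (fun x => x)
    rw [pvScan_eq_fold (PySem.List.sorted (pvWords lst) (fun x => x) false) 0 none 0,
      pvScan_main _ hsorted 0, zero_add,
      pvU_perm (PySem.List.sorted_perm (pvWords lst) (fun x => x) false)]
    have hB2 : (((pvWords lst).filter (fun x => x == PySem.Str.lower user_word)).length : Int)
        = (PySem.List.count (pvWords lst) (PySem.Str.lower user_word) : Int) := by
      simp [PySem.List.count, List.count_eq_countP, List.countP_eq_length_filter]
    rw [hB2]
  rw [hA, hB]
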